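-- pv_equiv track=rewrite | github.com/chesspiece/coderun2024_ml | src/task_552.py | check_tandem
-- ===== SOURCE A (Python) =====
-- from collections import defaultdict
--
-- def check_tandem(input_strings: list[str]) -> list[tuple[int, int]]:
--     res: list[tuple[int, int]] = []
--     add_str_left: dict[str, list[int]] = defaultdict(lambda: [])
--     for idx1, str1 in enumerate(input_strings):
--         add_str_left[str1].append(idx1)
--         ln = len(str1)
--         ln2 = ln // 2
--         for i in range(ln2):
--             if str1[0 : i + 1] == str1[ln - i - 1 : :]:
--                 add_str_left[str1[i + 1 : ln - i - 1]].append(idx1)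
--     for idx1, str1 in enumerate(input_strings):
--         idx_lst = add_str_left[str1]
--         for idx in idx_lst:
--             if idx == idx1:
--                 continue
--             res.append((idx + 1, idx1 + 1))
--             res.append((idx1 + 1, idx + 1))
--     return sorted(res)
-- ===== SOURCE B (Python) =====
-- def check_tandem(input_strings: list[str]) -> list[tuple[int, int]]:
--     # Inverted indexing: group equal strings once, then for each string look up
--     # each of its tandem-middles (b = 0 gives the string itself) in that table.
--     groups: dict[str, list[int]] = {}
--     for j, s in enumerate(input_strings):
--         groups.setdefault(s, []).append(j)
--     res: list[tuple[int, int]] = []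
--     for i, s in enumerate(input_strings):
--         n = len(s)
--         for b in range(n // 2 + 1):
--             if s[:b] != s[n - b:]:
--                 continue
--             for j in groups.get(s[b:n - b], ()):
--                 if j == i:
--                     continue
--                 res.append((i + 1, j + 1))
--                 res.append((j + 1, i + 1))
--     return sorted(res)
-- ===== Notes on version B (the rewrite author's own statement) =====
-- stated objective: alternative
-- what changed: B inverts the index: A registers every string under itself and under all of its tandem-middles in one dict and then looks each string up once; B groups equal strings once by value and, for each string, enumerates its own middles (b = 0..len//2, b = 0 giving the string itself) and looks each middle up in that group table.
import Mathlib
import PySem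

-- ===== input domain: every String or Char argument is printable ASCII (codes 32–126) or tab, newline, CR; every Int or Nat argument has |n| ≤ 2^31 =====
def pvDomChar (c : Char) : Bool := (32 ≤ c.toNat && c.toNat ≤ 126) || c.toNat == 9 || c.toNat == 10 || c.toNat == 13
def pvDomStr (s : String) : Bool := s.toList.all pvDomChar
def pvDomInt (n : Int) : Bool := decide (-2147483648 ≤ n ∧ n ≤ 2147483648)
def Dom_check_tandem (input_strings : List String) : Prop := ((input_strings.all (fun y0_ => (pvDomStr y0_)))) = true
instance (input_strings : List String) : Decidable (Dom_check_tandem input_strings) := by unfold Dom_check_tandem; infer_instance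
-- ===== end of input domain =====

-- B replaces A's dict of middles (every string registered under itself and each of its
-- tandem-middles, then one lookup per string) by the inverted index: group equal strings
-- once by value and, per string, look up each of its own middles (b = 0 .. len//2, b = 0
-- giving the string itself) in that group table; same cost, different traversal.

-- ===== PORT A =====
-- Strings are handled as their character lists (String ↔ List Char); dict keys are char lists.
def check_tandem (input_strings : List String) : List (Int × Int) :=
  let add_str_left : PySem.Dict (List Char) (List Int) :=
    (PySem.List.enumerate input_strings).foldl
      (fun (d : PySem.Dict (List Char) (List Int)) p =>
        let str1 := p.2.toList
        let d := d.modify str1 [] (fun l => l ++ [p.1])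
        let ln : Int := (str1.length : Int)
        let ln2 := PySem.Int.floordiv ln 2
        (PySem.List.pyRange 0 ln2).foldl
          (fun d i =>
            if PySem.List.slice str1 (some 0) (some (i + 1)) ==
               PySem.List.slice str1 (some (ln - i - 1)) none then
              d.modify (PySem.List.slice str1 (some (i + 1)) (some (ln - i - 1))) []
                (fun l => l ++ [p.1])
            else d) d)
      PySem.Dict.empty
  let res : List (Int × Int) :=
    (PySem.List.enumerate input_strings).foldl
      (fun res p =>
        -- str1 is always a key here (first loop inserted it), so defaultdict lookup = getD
        (add_str_left.getD p.2.toList []).foldl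
          (fun res idx =>
            if idx == p.1 then res
            else res ++ [(idx + 1, p.1 + 1)] ++ [(p.1 + 1, idx + 1)]) res)
      []
  PySem.List.sorted2 res (fun r => r.1) (fun r => r.2)

-- ===== PORT B =====
def check_tandem_alt (input_strings : List String) : List (Int × Int) :=
  let groups : PySem.Dict (List Char) (List Int) :=
    (PySem.List.enumerate input_strings).foldl
      (fun (g : PySem.Dict (List Char) (List Int)) p =>
        g.modify p.2.toList [] (fun l => l ++ [p.1]))
      PySem.Dict.empty
  let res : List (Int × Int) :=
    (PySem.List.enumerate input_strings).foldl
      (fun res p =>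
        let s := p.2.toList
        let n : Int := (s.length : Int)
        (PySem.List.pyRange 0 (PySem.Int.floordiv n 2 + 1)).foldl
          (fun res b =>
            if PySem.List.slice s none (some b) ==
               PySem.List.slice s (some (n - b)) none then
              (groups.getD (PySem.List.slice s (some b) (some (n - b))) []).foldl
                (fun res j =>
                  if j == p.1 then res
                  else res ++ [(p.1 + 1, j + 1)] ++ [(j + 1, p.1 + 1)]) res
            else res) res)
      []
  PySem.List.sorted2 res (fun r => r.1) (fun r => r.2)

-- ===== PRECONDITION & SPEC =====
def Spec_check_tandem (input_strings : List String) (out : List (Int × Int)) : Prop := out = check_tandem_alt input_strings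
instance (input_strings : List String) (out : List (Int × Int)) : Decidable (Spec_check_tandem input_strings out) := by unfold Spec_check_tandem; infer_instance

-- ===== CLAIM (what is proved, stated in full; the proofs are below) =====
def Claim_equal_check_tandem : Prop := ∀ (input_strings : List String), Dom_check_tandem input_strings → Spec_check_tandem input_strings (check_tandem input_strings)


-- ===== LEMMAS AND PROOFS =====

-- the two-element block emitted for a matching pair of indices
def pvBlk (i j : Int) : List (Int × Int) := [(i + 1, j + 1), (j + 1, i + 1)]

-- all keys a string is registered under in A / looked up under in B:
-- the middle s[b : n-b] for every b ≤ n/2 with s[:b] == s[n-b:]  (b = 0 gives s itself)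
def pvKeyList (cs : List Char) : List (List Char) :=
  ((List.range (cs.length / 2 + 1)).filter
      (fun b => cs.take b == cs.drop (cs.length - b))).map
    (fun b => (cs.drop b).take (cs.length - b - b))

-- register idx under every key of ks
def pvRegAll (d : PySem.Dict (List Char) (List Int)) (ks : List (List Char)) (idx : Int) :
    PySem.Dict (List Char) (List Int) :=
  ks.foldl (fun d k => d.modify k [] (fun l => l ++ [idx])) d

-- A's phase-1 dict, exactly as the port builds it
def pvDictA (xs : List String) : PySem.Dict (List Char) (List Int) :=
  (PySem.List.enumerate xs).foldl
    (fun (d : PySem.Dict (List Char) (List Int)) p =>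
      let str1 := p.2.toList
      let d := d.modify str1 [] (fun l => l ++ [p.1])
      let ln : Int := (str1.length : Int)
      let ln2 := PySem.Int.floordiv ln 2
      (PySem.List.pyRange 0 ln2).foldl
        (fun d i =>
          if PySem.List.slice str1 (some 0) (some (i + 1)) ==
             PySem.List.slice str1 (some (ln - i - 1)) none then
            d.modify (PySem.List.slice str1 (some (i + 1)) (some (ln - i - 1))) []
              (fun l => l ++ [p.1])
          else d) d)
    PySem.Dict.empty

-- A's unsorted result list, exactly as the port builds it
def pvResAraw (xs : List String) : List (Int × Int) :=
  (PySem.List.enumerate xs).foldl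
    (fun res p =>
      ((pvDictA xs).getD p.2.toList []).foldl
        (fun res idx =>
          if idx == p.1 then res
          else res ++ [(idx + 1, p.1 + 1)] ++ [(p.1 + 1, idx + 1)]) res)
    []

-- B's group dict, exactly as the port builds it
def pvGroups (xs : List String) : PySem.Dict (List Char) (List Int) :=
  (PySem.List.enumerate xs).foldl
    (fun (g : PySem.Dict (List Char) (List Int)) p =>
      g.modify p.2.toList [] (fun l => l ++ [p.1]))
    PySem.Dict.empty

-- B's unsorted result list, exactly as the port builds it
def pvResBraw (xs : List String) : List (Int × Int) :=
  (PySem.List.enumerate xs).foldl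
    (fun res p =>
      let s := p.2.toList
      let n : Int := (s.length : Int)
      (PySem.List.pyRange 0 (PySem.Int.floordiv n 2 + 1)).foldl
        (fun res b =>
          if PySem.List.slice s none (some b) ==
             PySem.List.slice s (some (n - b)) none then
            ((pvGroups xs).getD (PySem.List.slice s (some b) (some (n - b))) []).foldl
              (fun res j =>
                if j == p.1 then res
                else res ++ [(p.1 + 1, j + 1)] ++ [(j + 1, p.1 + 1)]) res
          else res) res)
    []

lemma pvKeyList_cons (cs : List Char) :
    pvKeyList cs = cs ::
      ((List.range (cs.length / 2)).filter
          (fun i => cs.take (i + 1) == cs.drop (cs.length - (i + 1)))).map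
        (fun i => (cs.drop (i + 1)).take (cs.length - (i + 1) - (i + 1))) := by
  unfold pvKeyList
  rw [List.range_succ_eq_map, List.filter_cons]
  simp only [List.take_zero, Nat.sub_zero, List.drop_length, List.drop_zero, beq_self_eq_true,
    if_true, List.map_cons, List.take_length, List.filter_map, List.map_map]
  constructor

lemma getD_pvRegAll (d : PySem.Dict (List Char) (List Int)) (ks : List (List Char))
    (idx : Int) (k : List Char) :
    (pvRegAll d ks idx).getD k [] = d.getD k [] ++ List.replicate (ks.count k) idx := by
  induction ks generalizing d with
  | nil => simp [pvRegAll]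
  | cons k0 ks ih =>
    rw [pvRegAll, List.foldl_cons, ← pvRegAll, ih, List.count_cons]
    rw [PySem.Dict.getD_modify]
    by_cases h : k = k0
    · subst h
      simp [List.replicate_add]
      rw [← List.replicate_succ, List.replicate_succ']
    · simp [beq_iff_eq, h, Ne.symm h]

lemma getD_foldl_pvRegAll (L : List (Int × String)) (kf : String → List (List Char))
    (d0 : PySem.Dict (List Char) (List Int)) (k : List Char) :
    (L.foldl (fun d p => pvRegAll d (kf p.2) p.1) d0).getD k []
      = d0.getD k [] ++ L.flatMap (fun q => List.replicate ((kf q.2).count k) q.1) := by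
  induction L generalizing d0 with
  | nil => simp
  | cons p L ih =>
    rw [List.foldl_cons, ih, getD_pvRegAll, List.flatMap_cons, List.append_assoc]

lemma pvBodyA_eq (d : PySem.Dict (List Char) (List Int)) (idx : Int) (cs : List Char) :
    ((PySem.List.pyRange 0 (PySem.Int.floordiv (cs.length : Int) 2)).foldl
      (fun d i =>
        if PySem.List.slice cs (some 0) (some (i + 1)) ==
           PySem.List.slice cs (some ((cs.length : Int) - i - 1)) none then
          d.modify (PySem.List.slice cs (some (i + 1)) (some ((cs.length : Int) - i - 1))) []
            (fun l => l ++ [idx])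
        else d)
      (d.modify cs [] (fun l => l ++ [idx])))
    = pvRegAll d (pvKeyList cs) idx := by
  rw [show (2 : Int) = ((2 : Nat) : Int) from rfl, PySem.Int.floordiv_natCast,
    PySem.List.pyRange_zero_natCast, List.foldl_map]
  rw [PySem.List.foldl_congr_mem _ _
    (fun d (i : Nat) =>
      if cs.take (i + 1) == cs.drop (cs.length - (i + 1)) then
        d.modify ((cs.drop (i + 1)).take (cs.length - (i + 1) - (i + 1))) [] (fun l => l ++ [idx])
      else d) _ ?_]
  · rw [PySem.List.foldl_if_eq_foldl_filter,
      ← List.foldl_map (f := fun i => (cs.drop (i + 1)).take (cs.length - (i + 1) - (i + 1)))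
        (g := fun (d : PySem.Dict (List Char) (List Int)) k => d.modify k [] (fun l => l ++ [idx])),
      pvKeyList_cons]
    rfl
  · intro acc i hi
    rw [List.mem_range] at hi
    have h1 : ((i : Int) + 1) = ((i + 1 : Nat) : Int) := by push_cast; ring
    have h2 : ((cs.length : Int) - i - 1) = ((cs.length - (i + 1) : Nat) : Int) := by
      push_cast [Nat.cast_sub (by omega : i + 1 ≤ cs.length)]; ring
    rw [h1, h2, PySem.List.slice_zero_start, PySem.List.slice_to_natCast,
      PySem.List.slice_from_natCast, PySem.List.slice_natCast]

lemma pvFoldlPairblock {α : Type} (p : α → Bool) (u v : α → Int × Int) (l : List α)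
    (res0 : List (Int × Int)) :
    l.foldl (fun res x => if p x then res else res ++ [u x] ++ [v x]) res0
      = res0 ++ l.flatMap (fun x => if p x then [] else [u x, v x]) := by
  have h : (fun (res : List (Int × Int)) x => if p x then res else res ++ [u x] ++ [v x])
      = fun res x => res ++ (if p x then [] else [u x, v x]) := by
    funext res x
    by_cases h : p x <;> simp [h]
  rw [h, PySem.List.foldl_append_eq_flatMap]

lemma pvFlatMapFilter {α β : Type} (p : α → Bool) (g : α → List β) (l : List α) :
    (l.filter p).flatMap g = l.flatMap (fun x => if p x then g x else []) := by
  induction l with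
  | nil => rfl
  | cons a l ih =>
    by_cases h : p a <;> simp [h, ih]

lemma pvReplFlattenComm {β : Type} (X : List β) (n : Nat) :
    X ++ (List.replicate n X).flatten = (List.replicate n X).flatten ++ X := by
  induction n with
  | zero => simp
  | succ n ih =>
    simp only [List.replicate_succ, List.flatten_cons, List.append_assoc]
    rw [← ih]

lemma pvFlatMapIfCount {β : Type} (cs : List Char) (ks : List (List Char)) (X : List β) :
    ks.flatMap (fun k => if cs == k then X else [])
      = (List.replicate (ks.count cs) X).flatten := by
  induction ks with
  | nil => rfl
  | cons k ks ih =>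
    rw [List.flatMap_cons, ih, List.count_cons]
    by_cases h : cs = k
    · subst h
      simp [List.replicate_add, pvReplFlattenComm]
    · simp [beq_iff_eq, h, Ne.symm h]

lemma pvBodyB_eq (grp : PySem.Dict (List Char) (List Int)) (idx : Int) (cs : List Char)
    (res : List (Int × Int)) :
    ((PySem.List.pyRange 0 (PySem.Int.floordiv (cs.length : Int) 2 + 1)).foldl
      (fun res b =>
        if PySem.List.slice cs none (some b) ==
           PySem.List.slice cs (some ((cs.length : Int) - b)) none then
          (grp.getD (PySem.List.slice cs (some b) (some ((cs.length : Int) - b))) []).foldl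
            (fun res j => if j == idx then res else res ++ [(idx + 1, j + 1)] ++ [(j + 1, idx + 1)])
            res
        else res) res)
    = res ++ (pvKeyList cs).flatMap
        (fun k => (grp.getD k []).flatMap
          (fun j => if j == idx then [] else pvBlk idx j)) := by
  have hr : PySem.Int.floordiv (cs.length : Int) 2 + 1 = ((cs.length / 2 + 1 : Nat) : Int) := by
    rw [show (2 : Int) = ((2 : Nat) : Int) from rfl, PySem.Int.floordiv_natCast]
    push_cast; ring
  rw [hr, PySem.List.pyRange_zero_natCast, List.foldl_map]
  rw [PySem.List.foldl_congr_mem _ _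
    (fun res (b : Nat) =>
      res ++ (if cs.take b == cs.drop (cs.length - b) then
        (grp.getD ((cs.drop b).take (cs.length - b - b)) []).flatMap
          (fun j => if j == idx then [] else pvBlk idx j)
      else [])) _ ?_]
  · rw [PySem.List.foldl_append_eq_flatMap]
    congr 1
    rw [← pvFlatMapFilter, pvKeyList, List.flatMap_map]
  · intro acc b hb
    rw [List.mem_range] at hb
    have h2 : ((cs.length : Int) - b) = ((cs.length - b : Nat) : Int) := by
      push_cast [Nat.cast_sub (by omega : b ≤ cs.length)]; ring
    rw [h2, PySem.List.slice_to_natCast, PySem.List.slice_from_natCast, PySem.List.slice_natCast]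
    dsimp only
    by_cases h : cs.take b == cs.drop (cs.length - b)
    · rw [if_pos h, if_pos h]
      rw [pvFoldlPairblock (p := fun j => j == idx)
        (u := fun j => (idx + 1, j + 1)) (v := fun j => (j + 1, idx + 1))]
      simp [pvBlk]
    · rw [if_neg h, if_neg h]
      simp

-- A's unsorted result in flatMap normal form
lemma pvResA_eq (xs : List String) :
    pvResAraw xs
      = (PySem.List.enumerate xs).flatMap (fun p =>
          (PySem.List.enumerate xs).flatMap (fun q =>
            (List.replicate ((pvKeyList q.2.toList).count p.2.toList)
              (if q.1 == p.1 then [] else pvBlk q.1 p.1)).flatten)) := by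
  have hdict : ∀ k, (pvDictA xs).getD k []
      = (PySem.List.enumerate xs).flatMap
          (fun q => List.replicate ((pvKeyList q.2.toList).count k) q.1) := by
    intro k
    have h1 : pvDictA xs = (PySem.List.enumerate xs).foldl
        (fun d p => pvRegAll d (pvKeyList p.2.toList) p.1) PySem.Dict.empty := by
      unfold pvDictA
      congr 1
      funext d p
      exact pvBodyA_eq d p.1 p.2.toList
    rw [h1, getD_foldl_pvRegAll _ (fun s => pvKeyList s.toList),
      PySem.Dict.getD_empty, List.nil_append]
  unfold pvResAraw
  have hbody : (fun (res : List (Int × Int)) (p : Int × String) =>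
      ((pvDictA xs).getD p.2.toList []).foldl
        (fun res idx =>
          if idx == p.1 then res
          else res ++ [(idx + 1, p.1 + 1)] ++ [(p.1 + 1, idx + 1)]) res)
      = fun res p => res ++ ((pvDictA xs).getD p.2.toList []).flatMap
          (fun idx => if idx == p.1 then [] else pvBlk idx p.1) := by
    funext res p
    rw [pvFoldlPairblock (p := fun idx => idx == p.1)
      (u := fun idx => (idx + 1, p.1 + 1)) (v := fun idx => (p.1 + 1, idx + 1))]
    simp [pvBlk]
  rw [hbody, PySem.List.foldl_append_eq_flatMap, List.nil_append]
  congr 1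
  funext p
  rw [hdict, List.flatMap_assoc]
  congr 1
  funext q
  rw [List.flatMap_replicate]

-- B's unsorted result in flatMap normal form
lemma pvResB_eq (xs : List String) :
    pvResBraw xs
      = (PySem.List.enumerate xs).flatMap (fun p =>
          (pvKeyList p.2.toList).flatMap (fun k =>
            (PySem.List.enumerate xs).flatMap (fun q =>
              if q.2.toList == k then
                (if q.1 == p.1 then [] else pvBlk p.1 q.1)
              else []))) := by
  have hgrp : ∀ k, (pvGroups xs).getD k []
      = (PySem.List.enumerate xs).flatMap
          (fun q => if q.2.toList == k then [q.1] else []) := by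
    intro k
    have h1 : pvGroups xs = (PySem.List.enumerate xs).foldl
        (fun g p => pvRegAll g [p.2.toList] p.1) PySem.Dict.empty := rfl
    rw [h1, getD_foldl_pvRegAll _ (fun s => [s.toList]), PySem.Dict.getD_empty, List.nil_append]
    congr 1
    funext q
    rw [List.count_singleton]
    by_cases h : q.2.toList = k
    · simp [h]
    · simp [beq_iff_eq, h]
  unfold pvResBraw
  have hbody : (fun (res : List (Int × Int)) (p : Int × String) =>
      (PySem.List.pyRange 0 (PySem.Int.floordiv ((p.2.toList.length : Int)) 2 + 1)).foldl
        (fun res b =>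
          if PySem.List.slice p.2.toList none (some b) ==
             PySem.List.slice p.2.toList (some ((p.2.toList.length : Int) - b)) none then
            ((pvGroups xs).getD
                (PySem.List.slice p.2.toList (some b) (some ((p.2.toList.length : Int) - b))) []).foldl
              (fun res j =>
                if j == p.1 then res
                else res ++ [(p.1 + 1, j + 1)] ++ [(j + 1, p.1 + 1)]) res
          else res) res)
      = fun res p => res ++ (pvKeyList p.2.toList).flatMap
          (fun k => ((pvGroups xs).getD k []).flatMap
            (fun j => if j == p.1 then [] else pvBlk p.1 j)) := by
    funext res p
    exact pvBodyB_eq (pvGroups xs) p.1 p.2.toList res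
  rw [hbody, PySem.List.foldl_append_eq_flatMap, List.nil_append]
  congr 1
  funext p
  congr 1
  funext k
  rw [hgrp, List.flatMap_assoc]
  congr 1
  funext q
  by_cases h : q.2.toList == k <;> simp [h]

-- double flatMap may be transposed up to permutation
lemma pvFlatMapComm {α β γ : Type} (l1 : List α) (l2 : List β) (f : α → β → List γ) :
    (l1.flatMap (fun a => l2.flatMap (fun b => f a b))).Perm
      (l2.flatMap (fun b => l1.flatMap (fun a => f a b))) := by
  rw [← Multiset.coe_eq_coe]
  simp only [← Multiset.coe_bind]
  exact Multiset.bind_bind _ _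

-- the guard may be flipped
lemma pvGuardFlip (i j : Int) (X : List (Int × Int)) :
    (if i == j then ([] : List (Int × Int)) else X) = (if j == i then [] else X) := by
  by_cases h : i = j
  · simp [h]
  · simp [beq_iff_eq, h, Ne.symm h]

-- the two unsorted result lists are permutations of each other
lemma pvPerm (xs : List String) : (pvResAraw xs).Perm (pvResBraw xs) := by
  rw [pvResA_eq, pvResB_eq]
  -- transpose A's double sum, so that the registering index becomes the outer one
  refine ((pvFlatMapComm _ _ _).trans ?_)
  apply List.Perm.flatMap_left
  intro q _
  -- B, inside its outer loop: transpose the key- and group-sums, then count the key hits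
  refine List.Perm.trans ?_ (pvFlatMapComm _ _ _).symm
  apply List.Perm.flatMap_left
  intro p _
  rw [pvFlatMapIfCount]
  rw [pvGuardFlip]

lemma pvSorted2_eq_sorted_lex (xs : List (Int × Int)) :
    PySem.List.sorted2 xs (fun r => r.1) (fun r => r.2)
      = PySem.List.sorted xs (fun r => toLex r) := by
  have hbe : (fun (a b : Int × Int) =>
        (decide (a.1 < b.1) || (!decide (b.1 < a.1) && decide (a.2 < b.2))))
      = fun (a b : Int × Int) => decide (toLex a < toLex b) := by
    funext a b
    have hl : (toLex a < toLex b) ↔ (a.1 < b.1 ∨ (a.1 = b.1 ∧ a.2 < b.2)) := Prod.Lex.lt_iff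
    by_cases h1 : a.1 < b.1 <;> by_cases h2 : b.1 < a.1 <;> by_cases h3 : a.2 < b.2 <;>
      simp [hl, h1, h2, h3] <;> omega
  rw [PySem.List.sorted_eq_foldl_insertBy]
  show xs.foldl (fun acc x => PySem.List.insertBy (fun a b =>
    (decide (a.1 < b.1) || (!decide (b.1 < a.1) && decide (a.2 < b.2)))) x acc) [] = _
  rw [hbe]

lemma pvSorted2_congr_perm (xs ys : List (Int × Int)) (h : xs.Perm ys) :
    PySem.List.sorted2 xs (fun r => r.1) (fun r => r.2)
      = PySem.List.sorted2 ys (fun r => r.1) (fun r => r.2) := by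
  rw [pvSorted2_eq_sorted_lex, pvSorted2_eq_sorted_lex]
  exact PySem.List.sorted_eq_sorted_of_perm _ _ _ (fun a b hab => by
    simpa using congrArg ofLex hab) h

-- ===== VERDICT (by name: the statement is the Claim_ definition above) =====
theorem check_tandem_spec : Claim_equal_check_tandem := by
  intro xs _
  show check_tandem xs = check_tandem_alt xs
  have hA : check_tandem xs
      = PySem.List.sorted2 (pvResAraw xs) (fun r => r.1) (fun r => r.2) := rfl
  have hB : check_tandem_alt xs
      = PySem.List.sorted2 (pvResBraw xs) (fun r => r.1) (fun r => r.2) := rfl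
  rw [hA, hB]
  exact pvSorted2_congr_perm _ _ (pvPerm xs)
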